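-- pv_equiv track=rewrite | github.com/AlessandroCaula/ProgrammingAlgoAndChallenges | SlothBytes/shuffled_properly.py | isShuffledWell
-- ===== SOURCE A (Python) =====
-- def isShuffledWell(nums: list[int]) -> bool:
--     for i in range(2, len(nums)):
--         if nums[i - 1] == nums[i] - 1:
--             if nums[i - 2] == nums[i - 1] - 1:
--                 return False
--         if nums[i - 1] == nums[i] + 1:
--             if nums[i - 2] == nums[i - 1] + 1:
--                 return False
--     return True
-- ===== SOURCE B (Python) =====
-- def isShuffledWell(nums: list[int]) -> bool:
--     # State machine: track the length of the current run of consecutive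
--     # ascending (+1) and descending (-1) steps; a run of length 3 fails.
--     run_up = 1
--     run_down = 1
--     prev = None
--     for v in nums:
--         if prev is not None and v == prev + 1:
--             run_up += 1
--             run_down = 1
--         elif prev is not None and v == prev - 1:
--             run_down += 1
--             run_up = 1
--         else:
--             run_up = 1
--             run_down = 1
--         if run_up >= 3 or run_down >= 3:
--             return False
--         prev = v
--     return True
-- ===== Notes on version B (the rewrite author's own statement) =====
-- stated objective: alternative
-- what changed: B is a single-pass run-length state machine (tracking the lengths of the current ascending and descending runs and failing when one reaches 3) instead of A's triple-window index comparisons.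
import Mathlib
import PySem

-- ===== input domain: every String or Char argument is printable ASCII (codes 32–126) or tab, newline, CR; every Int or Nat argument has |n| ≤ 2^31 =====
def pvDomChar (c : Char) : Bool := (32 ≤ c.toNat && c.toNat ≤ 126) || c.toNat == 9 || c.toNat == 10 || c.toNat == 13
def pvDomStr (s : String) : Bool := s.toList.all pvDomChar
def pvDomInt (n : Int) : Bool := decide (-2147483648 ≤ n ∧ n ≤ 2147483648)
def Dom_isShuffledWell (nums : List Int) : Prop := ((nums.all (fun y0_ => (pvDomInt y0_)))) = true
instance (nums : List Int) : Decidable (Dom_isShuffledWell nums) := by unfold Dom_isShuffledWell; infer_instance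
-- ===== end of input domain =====

-- B replaces A's triple-window index comparisons by a single-pass run-length state machine
-- over the elements (alternative decomposition; same cost).

-- ===== PORT A =====
-- 'for i in range(2, len(nums)): …' with early returns, as structural recursion over the range list
def isShuffledWellLoopA (nums : List Int) : List Int → Bool
  | [] => true
  | i :: rest =>
    if PySem.List.pyGetD nums (i - 1) 0 == PySem.List.pyGetD nums i 0 - 1 &&
       PySem.List.pyGetD nums (i - 2) 0 == PySem.List.pyGetD nums (i - 1) 0 - 1 then false
    else if PySem.List.pyGetD nums (i - 1) 0 == PySem.List.pyGetD nums i 0 + 1 &&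
            PySem.List.pyGetD nums (i - 2) 0 == PySem.List.pyGetD nums (i - 1) 0 + 1 then false
    else isShuffledWellLoopA nums rest

def isShuffledWell (nums : List Int) : Bool :=
  isShuffledWellLoopA nums (PySem.List.pyRange 2 nums.length 1)

-- ===== PORT B =====
-- 'for v in nums: …' with state (prev, run_up, run_down) and early return, as structural
-- recursion over the list; 'prev is None' is the match on the Option
def isShuffledWellLoopB : Option Int → Int → Int → List Int → Bool
  | _, _, _, [] => true
  | none, _, _, v :: rest =>
    if (1 : Int) ≥ 3 || (1 : Int) ≥ 3 then false
    else isShuffledWellLoopB (some v) 1 1 rest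
  | some p, ru, rd, v :: rest =>
    let s : Int × Int :=
      if v == p + 1 then (ru + 1, 1)
      else if v == p - 1 then (1, rd + 1)
      else (1, 1)
    if s.1 ≥ 3 || s.2 ≥ 3 then false
    else isShuffledWellLoopB (some v) s.1 s.2 rest

def isShuffledWell_alt (nums : List Int) : Bool :=
  isShuffledWellLoopB none 1 1 nums

-- ===== PRECONDITION & SPEC =====
def Spec_isShuffledWell (nums : List Int) (out : Bool) : Prop := out = isShuffledWell_alt nums
instance (nums : List Int) (out : Bool) : Decidable (Spec_isShuffledWell nums out) := by unfold Spec_isShuffledWell; infer_instance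

-- ===== CLAIM (what is proved, stated in full; the proofs are below) =====
def Claim_equal_isShuffledWell : Prop := ∀ (nums : List Int), Dom_isShuffledWell nums → Spec_isShuffledWell nums (isShuffledWell nums)

-- ===== LEMMAS AND PROOFS =====

-- Common structural reference: the triple-window check as recursion on the list itself
def win : List Int → Bool
  | x :: y :: z :: rest =>
    if (y == z - 1 && x == y - 1) || (y == z + 1 && x == y + 1) then false
    else win (y :: z :: rest)
  | _ => true

theorem win_short (l : List Int) (h : l.length ≤ 2) : win l = true := by
  match l with
  | [] => rfl
  | [_] => rfl
  | [_, _] => rfl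
  | _ :: _ :: _ :: _ => simp at h

-- A's loop from index k+2 computes win of the k-th suffix
theorem aLoop_eq_win (fuel : Nat) : ∀ (nums : List Int) (k : Nat),
    nums.length ≤ k + 2 + fuel →
    isShuffledWellLoopA nums (PySem.List.pyRange ((k : Int) + 2) nums.length 1) = win (nums.drop k) := by
  induction fuel with
  | zero =>
    intro nums k h
    rw [PySem.List.pyRange_one_eq_nil (by exact_mod_cast h)]
    rw [win_short _ (by simp; omega)]
    rfl
  | succ m ih =>
    intro nums k h
    by_cases hk : nums.length ≤ k + 2
    · rw [PySem.List.pyRange_one_eq_nil (by exact_mod_cast hk)]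
      rw [win_short _ (by simp; omega)]
      rfl
    · replace hk : k + 2 < nums.length := by omega
      rw [PySem.List.pyRange_one_cons (by exact_mod_cast hk)]
      have h0 : k < nums.length := by omega
      have h1 : k + 1 < nums.length := by omega
      have h2 : k + 2 < nums.length := by omega
      have hd : nums.drop k = nums[k] :: nums[k+1] :: nums[k+2] :: nums.drop (k+3) := by
        rw [List.drop_eq_getElem_cons h0, List.drop_eq_getElem_cons h1, List.drop_eq_getElem_cons h2]
      have e2 : ((k : Int) + 2) = ((k + 2 : Nat) : Int) := by omega
      have e1 : ((k : Int) + 2 - 1) = ((k + 1 : Nat) : Int) := by omega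
      have e0 : ((k : Int) + 2 - 2) = ((k : Nat) : Int) := by omega
      rw [isShuffledWellLoopA, e1, e0, e2,
        PySem.List.pyGetD_natCast, PySem.List.pyGetD_natCast, PySem.List.pyGetD_natCast,
        List.getD_eq_getElem _ _ h2, List.getD_eq_getElem _ _ h1, List.getD_eq_getElem _ _ h0]
      rw [hd, win]
      have e3 : (((k + 2 : Nat) : Int) + 1) = ((k + 1 : Nat) : Int) + 2 := by omega
      rw [e3]
      have ihk := ih nums (k + 1) (by omega)
      rw [List.drop_eq_getElem_cons h1, List.drop_eq_getElem_cons h2] at ihk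
      split_ifs with hA hB hW <;>
        simp only [Bool.and_eq_true, Bool.or_eq_true, beq_iff_eq] at * <;>
        first
        | rfl
        | omega

-- the virtual predecessor that a run-length state (ru, rd) at head y encodes
def ghost (ru rd y : Int) : Int :=
  if 2 ≤ ru then y - 1 else if 2 ≤ rd then y + 1 else y

-- win skips a head not adjacent to the next element
theorem win_skip (y z : Int) (t : List Int) (h1 : y ≠ z - 1) (h2 : y ≠ z + 1) :
    win (y :: z :: t) = win (z :: t) := by
  match t with
  | [] => rfl
  | w :: t' =>
    rw [win]
    have hc : ((z == w - 1 && y == z - 1) || (z == w + 1 && y == z + 1)) = false := by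
      simp only [Bool.or_eq_false_iff, Bool.and_eq_false_iff, beq_eq_false_iff_ne]
      constructor <;> right <;> assumption
    rw [hc]
    rfl

-- B's loop from a reachable state (some y, ru, rd) computes win with a virtual predecessor
theorem bLoop_eq_win : ∀ (rest : List Int) (y ru rd : Int),
    1 ≤ ru → 1 ≤ rd → ¬(2 ≤ ru ∧ 2 ≤ rd) →
    isShuffledWellLoopB (some y) ru rd rest = win (ghost ru rd y :: y :: rest) := by
  intro rest
  induction rest with
  | nil =>
    intro y ru rd _ _ _
    rw [win_short _ (by simp)]
    rfl
  | cons z t ih =>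
    intro y ru rd hru hrd hx
    rw [isShuffledWellLoopB, win]
    by_cases hz1 : z = y + 1
    · have hb : (z == y + 1) = true := by simp [hz1]
      simp only [hb, if_true]
      by_cases h2 : 2 ≤ ru
      · have hc1 : (ru + 1 ≥ 3 || (1 : Int) ≥ 3) = true := by
          simp only [Bool.or_eq_true, decide_eq_true_eq, ge_iff_le]; omega
        have hg : ghost ru rd y = y - 1 := by simp only [ghost]; (split_ifs; omega)
        have hc2 : ((y == z - 1 && ghost ru rd y == y - 1) ||
            (y == z + 1 && ghost ru rd y == y + 1)) = true := by
          simp only [hg, Bool.or_eq_true, Bool.and_eq_true, beq_iff_eq]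
          exact Or.inl ⟨by omega, trivial⟩
        simp only [hc1, hc2, if_true]
      · have hc1 : (ru + 1 ≥ 3 || (1 : Int) ≥ 3) = false := by
          simp only [Bool.or_eq_false_iff, decide_eq_false_iff_not, ge_iff_le]; omega
        have hc2 : ((y == z - 1 && ghost ru rd y == y - 1) ||
            (y == z + 1 && ghost ru rd y == y + 1)) = false := by
          simp only [ghost, Bool.or_eq_false_iff, Bool.and_eq_false_iff, beq_eq_false_iff_ne]
          split_ifs <;> constructor <;> first | (left; omega) | (right; omega)
        simp only [hc1, hc2]
        rw [ih z (ru + 1) 1 (by omega) (by omega) (by omega)]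
        have : ghost (ru + 1) 1 z = y := by simp only [ghost]; split_ifs <;> omega
        rw [this]
    · have hb : (z == y + 1) = false := by simp [hz1]
      simp only [hb, Bool.false_eq_true, if_false]
      by_cases hz2 : z = y - 1
      · have hb2 : (z == y - 1) = true := by simp [hz2]
        simp only [hb2, if_true]
        by_cases h2 : 2 ≤ rd
        · have hc1 : ((1 : Int) ≥ 3 || rd + 1 ≥ 3) = true := by
            simp only [Bool.or_eq_true, decide_eq_true_eq, ge_iff_le]; omega
          have hg : ghost ru rd y = y + 1 := by simp only [ghost]; split_ifs <;> omega
          have hc2 : ((y == z - 1 && ghost ru rd y == y - 1) ||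
              (y == z + 1 && ghost ru rd y == y + 1)) = true := by
            simp only [hg, Bool.or_eq_true, Bool.and_eq_true, beq_iff_eq]
            exact Or.inr ⟨by omega, trivial⟩
          simp only [hc1, hc2, if_true]
        · have hc1 : ((1 : Int) ≥ 3 || rd + 1 ≥ 3) = false := by
            simp only [Bool.or_eq_false_iff, decide_eq_false_iff_not, ge_iff_le]; omega
          have hc2 : ((y == z - 1 && ghost ru rd y == y - 1) ||
              (y == z + 1 && ghost ru rd y == y + 1)) = false := by
            simp only [ghost, Bool.or_eq_false_iff, Bool.and_eq_false_iff, beq_eq_false_iff_ne]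
            split_ifs <;> constructor <;> first | (left; omega) | (right; omega)
          simp only [hc1, hc2]
          rw [ih z 1 (rd + 1) (by omega) (by omega) (by omega)]
          have : ghost 1 (rd + 1) z = y := by simp only [ghost]; split_ifs <;> omega
          rw [this]
      · have hb2 : (z == y - 1) = false := by simp [hz2]
        simp only [hb2, Bool.false_eq_true, if_false]
        have hc1 : ((1 : Int) ≥ 3 || (1 : Int) ≥ 3) = false := by decide
        have hc2 : ((y == z - 1 && ghost ru rd y == y - 1) ||
            (y == z + 1 && ghost ru rd y == y + 1)) = false := by
          simp only [Bool.or_eq_false_iff, Bool.and_eq_false_iff, beq_eq_false_iff_ne]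
          constructor <;> left <;> omega
        simp only [hc1, hc2]
        rw [ih z 1 1 (by omega) (by omega) (by omega)]
        have hg : ghost 1 1 z = z := by simp only [ghost]; split_ifs <;> omega
        rw [hg, win_skip z z t (by omega) (by omega), win_skip y z t (by omega) (by omega)]

-- win ignores a duplicated head (the initial state has no predecessor)
theorem win_dup (v : Int) (rest : List Int) : win (v :: v :: rest) = win (v :: rest) :=
  win_skip v v rest (by omega) (by omega)

-- ===== VERDICT (by name: the statement is the Claim_ definition above) =====
theorem isShuffledWell_spec : Claim_equal_isShuffledWell := by
  intro nums _
  unfold Spec_isShuffledWell isShuffledWell isShuffledWell_alt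
  have hA := aLoop_eq_win nums.length nums 0 (by omega)
  norm_num [List.drop_zero] at hA
  rw [hA]
  match nums with
  | [] => rfl
  | v :: rest =>
    rw [isShuffledWellLoopB]
    have hc : ((1 : Int) ≥ 3 || (1 : Int) ≥ 3) = false := by decide
    rw [hc, if_neg (by simp)]
    rw [bLoop_eq_win rest v 1 1 (by omega) (by omega) (by omega)]
    have hg : ghost 1 1 v = v := by simp only [ghost]; split_ifs <;> omega
    rw [hg, win_dup]
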